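-- pv_equiv track=rewrite | github.com/jovalle/technis | src/tctl/compose_args.py | compose_subcommand
-- ===== SOURCE A (Python) =====
-- COMPOSE_GLOBAL_FLAGS_WITH_VALUE = {
--     "-f",
--     "--file",
--     "-p",
--     "--project-name",
--     "--profile",
--     "--env-file",
--     "--project-directory",
--     "--parallel",
--     "--progress",
--     "--ansi",
-- }
--
-- def compose_subcommand(args: tuple[str, ...]) -> tuple[str | None, int]:
--     """Return the compose subcommand and its index in args.
--
--     Global compose flags (and their values) are skipped before detecting the
--     first non-flag token.
--     """
--     index = 0
--     while index < len(args):
--         arg = args[index]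
--
--         if arg in COMPOSE_GLOBAL_FLAGS_WITH_VALUE:
--             index += 2
--             continue
--         if arg.startswith("--"):
--             if any(
--                 arg.startswith(f"{flag}=") for flag in COMPOSE_GLOBAL_FLAGS_WITH_VALUE
--             ):
--                 index += 1
--                 continue
--             index += 1
--             continue
--         if arg.startswith("-"):
--             index += 1
--             continue
--
--         return arg, index
--
--     return None, -1
-- ===== SOURCE B (Python) =====
-- COMPOSE_GLOBAL_FLAGS_WITH_VALUE = {
--     "-f",
--     "--file",
--     "-p",
--     "--project-name",
--     "--profile",
--     "--env-file",
--     "--project-directory",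
--     "--parallel",
--     "--progress",
--     "--ansi",
-- }
--
--
-- def compose_subcommand(args):
--     """Recursive decomposition: consume 2 tokens for a value-flag, 1 for any
--     other dash token, stop at the first plain token."""
--     def go(rest, i):
--         if not rest:
--             return None, -1
--         head = rest[0]
--         if head in COMPOSE_GLOBAL_FLAGS_WITH_VALUE:
--             return go(rest[2:], i + 2)
--         if head.startswith("-"):
--             return go(rest[1:], i + 1)
--         return head, i
--     return go(list(args), 0)
-- ===== Notes on version B (the rewrite author's own statement) =====
-- stated objective: idiomatic
-- what changed: Replaced the while-loop with a manual integer index (and its redundant '--'/'--flag=' sub-branches) by a structural recursion that pattern-matches the remaining token list, consuming two tokens for a value-flag and one for any other dash token.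
import Mathlib
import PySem

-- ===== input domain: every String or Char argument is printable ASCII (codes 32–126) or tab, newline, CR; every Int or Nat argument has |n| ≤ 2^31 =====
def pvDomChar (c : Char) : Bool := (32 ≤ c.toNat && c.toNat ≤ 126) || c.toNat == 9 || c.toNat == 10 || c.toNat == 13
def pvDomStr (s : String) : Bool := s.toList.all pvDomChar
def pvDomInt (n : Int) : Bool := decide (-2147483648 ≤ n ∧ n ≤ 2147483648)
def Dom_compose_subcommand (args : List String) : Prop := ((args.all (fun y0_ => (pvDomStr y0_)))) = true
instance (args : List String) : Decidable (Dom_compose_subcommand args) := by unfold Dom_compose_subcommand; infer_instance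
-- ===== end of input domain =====

-- B replaces A's manual-index while loop by a structural recursion on the token list (idiomatic decomposition, same O(n) cost).

-- COMPOSE_GLOBAL_FLAGS_WITH_VALUE (a set of string literals; membership only)
def composeGlobalFlags : List String :=
  ["-f", "--file", "-p", "--project-name", "--profile", "--env-file",
   "--project-directory", "--parallel", "--progress", "--ansi"]

-- ===== PORT A =====
-- A's while loop: index only grows, so recursion on args.length - index.
def compose_subcommand_loop (args : List String) (index : Nat) : Option String × Int :=
  if h : index < args.length then
    let arg := args[index]
    if arg ∈ composeGlobalFlags then
      compose_subcommand_loop args (index + 2)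
    else if PySem.Str.startswith arg "--" then
      if composeGlobalFlags.any (fun flag => PySem.Str.startswith arg (flag ++ "=")) then
        compose_subcommand_loop args (index + 1)
      else
        compose_subcommand_loop args (index + 1)
    else if PySem.Str.startswith arg "-" then
      compose_subcommand_loop args (index + 1)
    else
      (some arg, (index : Int))
  else
    (none, -1)
termination_by args.length - index

def compose_subcommand (args : List String) : Option String × Int :=
  compose_subcommand_loop args 0

-- ===== PORT B =====
-- Source B's helper go(rest, i): pattern-match on the remaining list; rest[2:] = drop 2, rest[1:] = drop 1.
def compose_subcommand_alt_go (rest : List String) (i : Int) : Option String × Int :=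
  match rest with
  | [] => (none, -1)
  | head :: tail =>
    if head ∈ composeGlobalFlags then
      compose_subcommand_alt_go (tail.drop 1) (i + 2)
    else if PySem.Str.startswith head "-" then
      compose_subcommand_alt_go tail (i + 1)
    else
      (some head, i)
termination_by rest.length
decreasing_by all_goals simp

def compose_subcommand_alt (args : List String) : Option String × Int :=
  compose_subcommand_alt_go args 0

-- ===== PRECONDITION & SPEC =====
def Spec_compose_subcommand (args : List String) (out : Option String × Int) : Prop := out = compose_subcommand_alt args
instance (args : List String) (out : Option String × Int) : Decidable (Spec_compose_subcommand args out) := by unfold Spec_compose_subcommand; infer_instance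

-- ===== CLAIM (what is proved, stated in full; the proofs are below) =====
def Claim_equal_compose_subcommand : Prop := ∀ (args : List String), Dom_compose_subcommand args → Spec_compose_subcommand args (compose_subcommand args)

-- ===== LEMMAS AND PROOFS =====

theorem startswith_trans_dash (s : String) (h : PySem.Str.startswith s "--" = true) :
    PySem.Str.startswith s "-" = true := by
  simp only [PySem.Str.startswith_eq, PySem.Chars.startswith_iff] at h ⊢
  exact List.IsPrefix.trans (by decide) h

theorem alt_go_nil (i : Int) : compose_subcommand_alt_go [] i = (none, -1) := by
  rw [compose_subcommand_alt_go]

theorem alt_go_cons (head : String) (tail : List String) (i : Int) :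
    compose_subcommand_alt_go (head :: tail) i =
      if head ∈ composeGlobalFlags then compose_subcommand_alt_go (tail.drop 1) (i + 2)
      else if PySem.Str.startswith head "-" then compose_subcommand_alt_go tail (i + 1)
      else (some head, i) := by
  rw [compose_subcommand_alt_go]

theorem loop_eq_go (args : List String) (index : Nat) :
    compose_subcommand_loop args index = compose_subcommand_alt_go (args.drop index) (index : Int) := by
  induction hn : args.length - index using Nat.strong_induction_on generalizing index with
  | _ n ih =>
  rw [compose_subcommand_loop]
  by_cases h : index < args.length
  · have hcons : args.drop index = args[index] :: args.drop (index + 1) :=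
      List.drop_eq_getElem_cons h
    rw [hcons, alt_go_cons]
    simp only [h, dif_pos]
    by_cases hmem : args[index] ∈ composeGlobalFlags
    · rw [if_pos hmem, if_pos hmem, List.drop_drop,
        ih (args.length - (index + 2)) (by omega) (index + 2) rfl]
      have : ((index : Int) + 2) = ((index + 2 : Nat) : Int) := by push_cast; ring
      rw [this]
    · rw [if_neg hmem, if_neg hmem]
      have hstep : compose_subcommand_loop args (index + 1) =
          compose_subcommand_alt_go (args.drop (index + 1)) ((index : Int) + 1) := by
        rw [ih (args.length - (index + 1)) (by omega) (index + 1) rfl]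
        have : ((index : Int) + 1) = ((index + 1 : Nat) : Int) := by push_cast; ring
        rw [this]
      rw [← hstep]
      split_ifs with h1 h2 h3 h4 <;>
        first
          | rfl
          | exact absurd (startswith_trans_dash _ h1) (by assumption)
  · simp only [h, dif_neg, not_false_iff]
    rw [List.drop_eq_nil_of_le (by omega), alt_go_nil]

-- ===== VERDICT (by name: the statement is the Claim_ definition above) =====
theorem compose_subcommand_spec : Claim_equal_compose_subcommand := by
  intro args _
  unfold Spec_compose_subcommand compose_subcommand compose_subcommand_alt
  simpa using loop_eq_go args 0
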